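-- pv_equiv track=rewrite | github.com/lasaladeetlevinaigre/CPGE | TIPE/main.py | vectors2Str
-- ===== SOURCE A (Python) =====
-- def vectors2Str(vectors):
--     txt = ""
--     nb_zero = 0
--     for (x, y) in vectors:
--         if x == 0 and y == 0:
--             nb_zero += 1
--         else:
--             if nb_zero != 0:
--                 # on ajoute les zeros trouvés avant
--                 txt += str(nb_zero)+";"
--                 nb_zero = 0
--
--             txt += str(x) + "," + str(y) + ";"
--
--     # si on termine par des 0
--     if nb_zero != 0:
--         txt += str(nb_zero)+";"
--         nb_zero = 0
--
--     return txt
-- ===== SOURCE B (Python) =====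
-- def vectors2Str(vectors):
--     vs = list(vectors)
--     n = len(vs)
--     pieces = []
--     i = 0
--     while i < n:
--         x, y = vs[i]
--         if x == 0 and y == 0:
--             # scan the whole run of zero vectors, emit its length once
--             j = i + 1
--             while j < n:
--                 x2, y2 = vs[j]
--                 if x2 == 0 and y2 == 0:
--                     j += 1
--                 else:
--                     break
--             pieces.append(str(j - i) + ";")
--             i = j
--         else:
--             pieces.append(str(x) + "," + str(y) + ";")
--             i += 1
--     return "".join(pieces)
-- ===== Notes on version B (the rewrite author's own statement) =====
-- stated objective: alternative
-- what changed: Replaces the running zero-counter with pending-flush logic by a group-then-emit scan: each run of zero vectors is measured in one inner scan and emitted immediately, and the output is assembled as a list of pieces joined at the end instead of repeated string concatenation.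
import Mathlib
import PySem

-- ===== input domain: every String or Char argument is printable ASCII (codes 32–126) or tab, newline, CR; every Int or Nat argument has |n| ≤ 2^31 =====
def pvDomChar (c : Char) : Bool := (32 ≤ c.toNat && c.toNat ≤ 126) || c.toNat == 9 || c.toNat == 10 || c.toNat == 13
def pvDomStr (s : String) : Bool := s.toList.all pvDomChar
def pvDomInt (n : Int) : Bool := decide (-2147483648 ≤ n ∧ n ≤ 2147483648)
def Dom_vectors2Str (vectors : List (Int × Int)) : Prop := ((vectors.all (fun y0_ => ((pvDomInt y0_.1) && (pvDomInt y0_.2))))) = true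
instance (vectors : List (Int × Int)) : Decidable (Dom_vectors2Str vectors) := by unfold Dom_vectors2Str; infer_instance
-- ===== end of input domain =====

-- B replaces A's running zero-counter with pending flushes by a group-then-emit scan
-- (measure each run of zeros in one inner scan, emit it at once, join the pieces); alternative, same cost.

-- ===== PORT A =====
-- loop body of A's for-loop: state = (txt, nb_zero)
def aStep (st : String × Int) (v : Int × Int) : String × Int :=
  if v.1 = 0 ∧ v.2 = 0 then (st.1, st.2 + 1)
  else
    let txt := if st.2 ≠ 0 then st.1 ++ PySem.Int.toStr st.2 ++ ";" else st.1
    (txt ++ PySem.Int.toStr v.1 ++ "," ++ PySem.Int.toStr v.2 ++ ";", 0)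

-- A's final flush of the trailing zeros
def aFinish (st : String × Int) : String :=
  if st.2 ≠ 0 then st.1 ++ PySem.Int.toStr st.2 ++ ";" else st.1

def vectors2Str (vectors : List (Int × Int)) : String :=
  aFinish (vectors.foldl aStep ("", 0))

-- ===== PORT B =====
-- length of the inner `while` scan of Source B: how many leading zero vectors
def zeroRun : List (Int × Int) → Nat
  | [] => 0
  | (x, y) :: rest => if x = 0 ∧ y = 0 then zeroRun rest + 1 else 0

-- advancing the index i past the scanned run (i = j)
def dropRun : List (Int × Int) → List (Int × Int)
  | [] => []
  | (x, y) :: rest => if x = 0 ∧ y = 0 then dropRun rest else (x, y) :: rest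

theorem dropRun_length_le (l : List (Int × Int)) : (dropRun l).length ≤ l.length := by
  induction l with
  | nil => simp [dropRun]
  | cons v rest ih =>
    obtain ⟨x, y⟩ := v
    simp only [dropRun]
    split
    · exact le_trans ih (Nat.le_succ _)
    · simp

-- the `pieces` list of Source B
def altPieces : List (Int × Int) → List String
  | [] => []
  | (x, y) :: rest =>
    if x = 0 ∧ y = 0 then
      (PySem.Int.toStr ((zeroRun rest : Int) + 1) ++ ";") :: altPieces (dropRun rest)
    else
      (PySem.Int.toStr x ++ "," ++ PySem.Int.toStr y ++ ";") :: altPieces rest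
termination_by l => l.length
decreasing_by
  · exact Nat.lt_succ_of_le (dropRun_length_le rest)
  · simp

def vectors2Str_alt (vectors : List (Int × Int)) : String :=
  PySem.Str.join "" (altPieces vectors)

-- ===== PRECONDITION & SPEC =====
def Spec_vectors2Str (vectors : List (Int × Int)) (out : String) : Prop := out = vectors2Str_alt vectors
instance (vectors : List (Int × Int)) (out : String) : Decidable (Spec_vectors2Str vectors out) := by unfold Spec_vectors2Str; infer_instance

-- ===== CLAIM (what is proved, stated in full; the proofs are below) =====
def Claim_equal_vectors2Str : Prop := ∀ (vectors : List (Int × Int)), Dom_vectors2Str vectors → Spec_vectors2Str vectors (vectors2Str vectors)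

-- ===== LEMMAS AND PROOFS =====

-- character list of B's joined output
def pj (l : List (Int × Int)) : List Char := (PySem.Str.join "" (altPieces l)).toList

-- character list of A's flush of n pending zeros
def zl (n : Int) : List Char := if n = 0 then [] else (PySem.Int.toStr n).toList ++ [';']

theorem join_empty_cons (s : String) (l : List String) :
    PySem.Str.join "" (s :: l) = s ++ PySem.Str.join "" l := by
  apply String.toList_inj.mp
  cases l with
  | nil => simp [PySem.Str.toList_join, PySem.Chars.join, List.intercalate]
  | cons t rest =>
    rw [PySem.Str.toList_join]
    simp only [List.map_cons]
    rw [show ("" : String).toList = [] by rfl, PySem.Chars.join_cons_cons]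
    simp [PySem.Str.toList_join]

theorem pj_nil : pj [] = [] := by
  simp [pj, altPieces, PySem.Str.toList_join, PySem.Chars.join, List.intercalate]

theorem pj_cons (v : Int × Int) (rest : List (Int × Int)) :
    pj (v :: rest) =
      (if v.1 = 0 ∧ v.2 = 0 then
        (PySem.Int.toStr ((zeroRun rest : Int) + 1) ++ ";").toList ++ pj (dropRun rest)
      else
        (PySem.Int.toStr v.1 ++ "," ++ PySem.Int.toStr v.2 ++ ";").toList ++ pj rest) := by
  obtain ⟨x, y⟩ := v
  simp only [pj, altPieces]
  split <;> rw [join_empty_cons] <;> simp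

-- B's output splits as: the leading zero run's piece, then the rest
theorem pj_split (l : List (Int × Int)) : pj l = zl (zeroRun l) ++ pj (dropRun l) := by
  cases l with
  | nil => simp [pj_nil, zeroRun, dropRun, zl]
  | cons v rest =>
    obtain ⟨x, y⟩ := v
    by_cases h : x = 0 ∧ y = 0
    · rw [pj_cons]
      simp only [if_pos h, zeroRun, dropRun]
      have hc : ((zeroRun rest + 1 : Nat) : Int) = (zeroRun rest : Int) + 1 := by push_cast; ring
      rw [hc]
      simp only [zl, if_neg (show ¬((zeroRun rest : Int) + 1 = 0) by omega)]
      simp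
    · simp only [zeroRun, dropRun, if_neg h]
      simp [zl]

-- loop invariant: running A's loop from state (txt, nb) and flushing equals
-- txt, then the flush of (nb + leading zero run), then B's pieces for the remainder
theorem loop_lemma (vs : List (Int × Int)) : ∀ (txt : String) (nb : Int), 0 ≤ nb →
    (aFinish (vs.foldl aStep (txt, nb))).toList =
      txt.toList ++ zl (nb + zeroRun vs) ++ pj (dropRun vs) := by
  induction vs with
  | nil =>
    intro txt nb _
    simp only [List.foldl_nil, aFinish, zeroRun, dropRun, pj_nil, zl]
    by_cases h : nb = 0
    · simp [h]
    · rw [if_pos h, if_neg (by omega)]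
      simp
  | cons v rest ih =>
    intro txt nb hnb
    obtain ⟨x, y⟩ := v
    by_cases h : x = 0 ∧ y = 0
    · simp only [List.foldl_cons, aStep, if_pos h, zeroRun, dropRun]
      rw [ih txt (nb + 1) (by omega)]
      have hc : nb + 1 + (zeroRun rest : Int) = nb + ((zeroRun rest + 1 : Nat) : Int) := by
        push_cast; ring
      rw [hc]
    · simp only [List.foldl_cons, aStep, if_neg h, zeroRun, dropRun]
      rw [ih _ 0 (le_refl 0), pj_cons]
      simp only [if_neg h]
      rw [pj_split rest]
      by_cases hm : nb = 0 <;>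
        simp [hm, zl, String.toList_append, List.append_assoc]

-- ===== VERDICT (by name: the statement is the Claim_ definition above) =====
theorem vectors2Str_spec : Claim_equal_vectors2Str := by
  intro vectors _
  unfold Spec_vectors2Str vectors2Str vectors2Str_alt
  apply String.toList_inj.mp
  rw [loop_lemma vectors "" 0 (le_refl 0)]
  show _ = pj vectors
  rw [pj_split vectors]
  simp
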